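-- pv_equiv track=rewrite | github.com/sermila88/Wildfire-Detection-DETR | src/images/utils/nemo_ground_truth_bb.py | get_density_category
-- ===== SOURCE A (Python) =====
-- def get_density_category(boxes):
--     """Determine if image has single density type or mixed"""
--     densities = set([box['density'] for box in boxes])
--
--     if len(densities) == 0:
--         return None
--     elif len(densities) == 1:
--         return list(densities)[0]
--     else:
--         return 'mixed'
-- ===== SOURCE B (Python) =====
-- def get_density_category(boxes):
--     """Determine if image has single density type or mixed"""
--     first = None
--     mixed = False
--     for box in boxes:
--         d = box['density']
--         if first is None:
--             first = d
--         elif d != first: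
--             mixed = True
--     if first is None:
--         return None
--     return 'mixed' if mixed else first
-- ===== Notes on version B (the rewrite author's own statement) =====
-- stated objective: simpler
-- what changed: Replaces the deduplicating set (build set, branch on its size, convert back to a list) by a single pass keeping two scalars: the first density seen and a 'mixed' flag.
import Mathlib
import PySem

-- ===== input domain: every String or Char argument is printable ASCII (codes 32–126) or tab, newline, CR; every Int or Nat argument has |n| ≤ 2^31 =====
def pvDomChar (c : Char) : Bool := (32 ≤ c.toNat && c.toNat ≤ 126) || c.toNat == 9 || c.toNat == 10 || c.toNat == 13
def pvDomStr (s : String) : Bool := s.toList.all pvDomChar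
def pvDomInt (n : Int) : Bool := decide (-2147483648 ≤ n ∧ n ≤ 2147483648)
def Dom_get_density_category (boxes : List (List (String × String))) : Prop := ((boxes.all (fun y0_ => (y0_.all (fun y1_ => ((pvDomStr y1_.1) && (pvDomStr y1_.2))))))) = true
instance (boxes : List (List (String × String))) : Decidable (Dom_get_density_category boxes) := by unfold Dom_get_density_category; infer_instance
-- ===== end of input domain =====

-- B replaces A's deduplicating set by a single pass over the boxes keeping two
-- scalars (the first density seen and a 'mixed' flag); objective: simpler.

-- box['density']: first-match lookup; total form via getD "" — exact under
-- Pre_get_density_category, which guarantees the key is present.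
def pvLookupDensity (box : List (String × String)) : String :=
  ((PySem.Dict.mk box).get? "density").getD ""

-- ===== PORT A =====
def get_density_category (boxes : List (List (String × String))) : Option String :=
  let densities : PySem.Set String :=
    PySem.Set.ofList (boxes.map (fun box => pvLookupDensity box))
  if densities.length = 0 then none
  else if densities.length = 1 then some densities.headI
  else some "mixed"

-- ===== PORT B =====
def get_density_category_alt (boxes : List (List (String × String))) : Option String :=
  let st := boxes.foldl
    (fun (st : Option String × Bool) box =>
      let d := pvLookupDensity box
      match st.1 with
      | none => (some d, st.2)
      | some f => (some f, st.2 || (d != f)))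
    (none, false)
  match st.1 with
  | none => none
  | some f => if st.2 then some "mixed" else some f

-- ===== PRECONDITION & SPEC =====
-- Pre_ excludes exactly the boxes without a 'density' key, on which Python A
-- (and B) raise KeyError.
def Pre_get_density_category (boxes : List (List (String × String))) : Prop :=
  (boxes.all (fun box => box.any (fun kv => kv.1 == "density"))) = true
instance (boxes : List (List (String × String))) : Decidable (Pre_get_density_category boxes) := by unfold Pre_get_density_category; infer_instance

def pvWitness_get_density_category : (List (List (String × String))) :=
  [[("density", "low")], [("density", "low")]]

def Spec_get_density_category (boxes : List (List (String × String))) (out : Option String) : Prop := out = get_density_category_alt boxes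
instance (boxes : List (List (String × String))) (out : Option String) : Decidable (Spec_get_density_category boxes out) := by unfold Spec_get_density_category; infer_instance

-- ===== CLAIM (what is proved, stated in full; the proofs are below) =====
def Claim_equal_get_density_category : Prop := ∀ (boxes : List (List (String × String))), Dom_get_density_category boxes → Pre_get_density_category boxes → Spec_get_density_category boxes (get_density_category boxes)

-- ===== LEMMAS AND PROOFS =====

-- folding Set.add never shrinks the accumulator
theorem pv_add_len_mono (ds : List String) (s : List String) :
    s.length ≤ (ds.foldl PySem.Set.add s).length := by
  induction ds generalizing s with
  | nil => simp
  | cons d ds ih =>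
    simp only [List.foldl_cons]
    refine le_trans ?_ (ih (PySem.Set.add s d))
    simp only [PySem.Set.add]
    split <;> simp

-- folding Set.add keeps the first element of a nonempty accumulator
theorem pv_add_headI (ds : List String) (s : List String) (hs : s ≠ []) :
    (ds.foldl PySem.Set.add s).headI = s.headI ∧ (ds.foldl PySem.Set.add s) ≠ [] := by
  induction ds generalizing s with
  | nil => exact ⟨rfl, hs⟩
  | cons d ds ih =>
    simp only [List.foldl_cons]
    have h1 : PySem.Set.add s d ≠ [] := by
      simp only [PySem.Set.add]; split
      · exact hs
      · simp
    have h2 : (PySem.Set.add s d).headI = s.headI := by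
      simp only [PySem.Set.add]; split
      · rfl
      · cases s with
        | nil => exact absurd rfl hs
        | cons a t => rfl
    obtain ⟨hh, hn⟩ := ih (PySem.Set.add s d) h1
    exact ⟨hh.trans h2, hn⟩

-- the fold keeps size exactly when every element is already in the accumulator
theorem pv_add_len_eq_iff (ds : List String) (s : List String) :
    (ds.foldl PySem.Set.add s).length = s.length ↔
      (ds.all (fun x => s.contains x)) = true := by
  induction ds generalizing s with
  | nil => simp
  | cons d ds ih =>
    simp only [List.foldl_cons, List.all_cons, Bool.and_eq_true]
    by_cases hc : d ∈ s
    · have : PySem.Set.add s d = s := by simp [PySem.Set.add, hc]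
      rw [this]
      simp [ih, hc]
    · have hadd : PySem.Set.add s d = s ++ [d] := by simp [PySem.Set.add, hc]
      rw [hadd]
      constructor
      · intro h
        exfalso
        have := pv_add_len_mono ds (s ++ [d])
        simp only [List.length_append, List.length_singleton] at this
        omega
      · rintro ⟨h, -⟩
        exact absurd (by simpa using h) hc

-- B's fold from a committed first element
theorem pv_alt_foldl (ds : List String) (f : String) (m : Bool) :
    (ds.foldl
      (fun (st : Option String × Bool) d =>
        match st.1 with
        | none => (some d, st.2)
        | some f => (some f, st.2 || (d != f)))
      (some f, m)) = (some f, m || ds.any (fun d => d != f)) := by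
  induction ds generalizing m with
  | nil => simp
  | cons d ds ih =>
    simp only [List.foldl_cons, List.any_cons]
    rw [ih]
    simp [Bool.or_assoc]

-- the core equivalence, stated on the list of density strings
theorem pv_core (d : String) (ds : List String) :
    (let densities := List.foldl PySem.Set.add [] (d :: ds)
     if densities.length = 0 then (none : Option String)
     else if densities.length = 1 then some densities.headI
     else some "mixed")
    = (let st := ds.foldl
        (fun (st : Option String × Bool) x =>
          match st.1 with
          | none => (some x, st.2)
          | some f => (some f, st.2 || (x != f)))
        (some d, false)
       match st.1 with
       | none => (none : Option String)
       | some f => if st.2 then some "mixed" else some f) := by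
  simp only [List.foldl_cons, pv_alt_foldl, Bool.false_or]
  have hadd : PySem.Set.add [] d = [d] := by simp [PySem.Set.add]
  rw [hadd]
  have hmono := pv_add_len_mono ds [d]
  simp only [List.length_singleton] at hmono
  have hhead := (pv_add_headI ds [d] (by simp)).1
  have hlen := pv_add_len_eq_iff ds [d]
  simp only [List.length_singleton] at hlen
  by_cases hall : (ds.all (fun x => [d].contains x)) = true
  · have h1 : (ds.foldl PySem.Set.add [d]).length = 1 := hlen.mpr hall
    have hany : ds.any (fun x => x != d) = false := by
      simp only [List.all_eq_true, List.contains_cons, List.contains_nil,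
        Bool.or_false, beq_iff_eq] at hall
      simp only [List.any_eq_false, bne_iff_ne, ne_eq, not_not]
      intro x hx
      exact hall x hx
    simp [h1, hany, hhead]
  · have h1 : (ds.foldl PySem.Set.add [d]).length ≠ 1 := fun h => hall (hlen.mp h)
    have hany : ds.any (fun x => x != d) = true := by
      simp only [List.all_eq_true, List.contains_cons, List.contains_nil,
        Bool.or_false, beq_iff_eq, not_forall] at hall
      obtain ⟨x, hx, hne⟩ := hall
      simp only [List.any_eq_true, bne_iff_ne, ne_eq]
      exact ⟨x, hx, fun h => hne h⟩
    have h0 : (ds.foldl PySem.Set.add [d]).length ≠ 0 := by omega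
    simp [h0, h1, hany]

-- bridge: B's fold over boxes equals the same fold over the mapped densities
theorem pv_alt_map (bs : List (List (String × String))) (init : Option String × Bool) :
    (bs.foldl
      (fun (st : Option String × Bool) box =>
        match st.1 with
        | none => (some (pvLookupDensity box), st.2)
        | some f => (some f, st.2 || (pvLookupDensity box != f)))
      init)
    = ((bs.map (fun box => pvLookupDensity box)).foldl
      (fun (st : Option String × Bool) x =>
        match st.1 with
        | none => (some x, st.2)
        | some f => (some f, st.2 || (x != f)))
      init) := by
  induction bs generalizing init with
  | nil => rfl
  | cons b bs ih => simp only [List.map_cons, List.foldl_cons]; exact ih _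

-- ===== VERDICT (by name: the statement is the Claim_ definition above) =====
theorem get_density_category_spec : Claim_equal_get_density_category := by
  intro boxes _ _
  unfold Spec_get_density_category get_density_category get_density_category_alt
  rw [PySem.Set.ofList_eq_foldl]
  cases boxes with
  | nil => rfl
  | cons b bs =>
    simp only [List.map_cons, List.foldl_cons, pv_alt_map]
    have := pv_core (pvLookupDensity b) (bs.map (fun box => pvLookupDensity box))
    simp only [List.foldl_cons] at this
    exact this
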